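-- pv_equiv track=rewrite | github.com/biolab/orange3 | Orange/widgets/utils/matplotlib_export.py | index_per_different
-- ===== SOURCE A (Python) =====
-- def index_per_different(l):
--     different = []
--     different_ind = {}
--     index = []
--     for e in l:
--         if e not in different_ind:
--             different_ind[e] = len(different)
--             different.append(e)
--         index.append(different_ind[e])
--     return different, index
-- ===== SOURCE B (Python) =====
-- def index_per_different(l):
--     # positions of first occurrences, in order; the k-th distinct element is l[firsts[k]],
--     # and an element's code is the rank of its first-occurrence position among firsts.
--     firsts = [i for i, e in enumerate(l) if l.index(e) == i]
--     different = [l[i] for i in firsts]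
--     index = [firsts.index(l.index(e)) for e in l]
--     return different, index
-- ===== Notes on version B (the rewrite author's own statement) =====
-- stated objective: alternative
-- what changed: B drops A's incrementally-grown dedup list and hash table entirely: it characterises the result positionally (firsts = positions whose element's l.index equals the position; an element's code is the rank of its first-occurrence position in firsts) and builds each of the three lists by an independent scan using only l.index, trading A's O(n) hash-based single pass for a dict-free O(n^2) counting formulation.
import Mathlib
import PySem

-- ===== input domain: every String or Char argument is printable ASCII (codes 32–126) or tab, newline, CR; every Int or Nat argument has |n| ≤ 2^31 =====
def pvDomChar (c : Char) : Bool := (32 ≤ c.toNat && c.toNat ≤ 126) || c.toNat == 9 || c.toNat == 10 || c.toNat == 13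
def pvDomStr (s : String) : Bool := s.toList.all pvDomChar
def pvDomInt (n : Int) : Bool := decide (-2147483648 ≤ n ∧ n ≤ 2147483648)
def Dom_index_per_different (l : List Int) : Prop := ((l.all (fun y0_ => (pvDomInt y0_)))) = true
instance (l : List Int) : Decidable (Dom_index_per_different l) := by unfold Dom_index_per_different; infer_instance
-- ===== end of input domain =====

-- B replaces A's incrementally-grown dedup list + hash table by a dict-free positional
-- characterisation (first-occurrence positions and ranks via l.index); alternative, not faster.

-- ===== PORT A =====
-- loop body of A's 'for e in l' (state: different, different_ind, index)
def ipdStep (st : List Int × PySem.Dict Int Int × List Int) (e : Int) :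
    List Int × PySem.Dict Int Int × List Int :=
  let different := st.1
  let different_ind := st.2.1
  let index := st.2.2
  let (different, different_ind) :=
    if !(different_ind.contains e) then
      (different ++ [e], different_ind.insert e (different.length : Int))
    else (different, different_ind)
  -- different_ind[e]: the key is always present here, so getD is exact
  (different, different_ind, index ++ [different_ind.getD e 0])

def index_per_different (l : List Int) : List Int × List Int :=
  let st := l.foldl ipdStep ([], PySem.Dict.empty, [])
  (st.1, st.2.2)

-- ===== PORT B =====
-- l.index(e): e is always a member where B calls it, so `.getD 0` is exact
def index_per_different_alt (l : List Int) : List Int × List Int :=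
  let firsts : List Int :=
    ((PySem.List.enumerate l 0).filter
      (fun p => (((PySem.List.index? l p.2).getD 0 : Nat) : Int) == p.1)).map (·.1)
  let different := firsts.map (fun i => PySem.List.pyGetD l i 0)
  let index := l.map (fun e =>
    (((PySem.List.index? firsts (((PySem.List.index? l e).getD 0 : Nat) : Int)).getD 0 : Nat) : Int))
  (different, index)

-- ===== PRECONDITION & SPEC =====
def Spec_index_per_different (l : List Int) (out : List Int × List Int) : Prop := out = index_per_different_alt l
instance (l : List Int) (out : List Int × List Int) : Decidable (Spec_index_per_different l out) := by unfold Spec_index_per_different; infer_instance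

-- ===== CLAIM (what is proved, stated in full; the proofs are below) =====
def Claim_equal_index_per_different : Prop := ∀ (l : List Int), Dom_index_per_different l → Spec_index_per_different l (index_per_different l)

-- ===== LEMMAS AND PROOFS =====

-- the lookup table maps exactly the members of `diff` to their first-occurrence position
def TblInv (diff : List Int) (d : PySem.Dict Int Int) : Prop :=
  ∀ x : Int, d.get? x = if x ∈ diff then some ((diff.idxOf x : Nat) : Int) else none

theorem tblInv_empty : TblInv [] PySem.Dict.empty := by
  intro x; simp [PySem.Dict.get?_empty]

theorem tblInv_extend {diff : List Int} {d : PySem.Dict Int Int} {a : Int}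
    (h : TblInv diff d) (ha : a ∉ diff) :
    TblInv (diff ++ [a]) (d.insert a (diff.length : Int)) := by
  intro x
  by_cases hxa : x = a
  · subst hxa
    rw [PySem.Dict.get?_insert_self]
    rw [List.idxOf_append_of_notMem ha]
    simp
  · rw [PySem.Dict.get?_insert_of_ne d _ hxa, h x]
    by_cases hx : x ∈ diff
    · rw [List.idxOf_append_of_mem hx]
      simp [hx]
    · have : x ∉ diff ++ [a] := by simp [hx, hxa]
      simp [hx, this]

theorem tblInv_contains {diff : List Int} {d : PySem.Dict Int Int} (h : TblInv diff d) (e : Int) :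
    d.contains e = decide (e ∈ diff) := by
  rw [PySem.Dict.contains_eq_isSome_get?, h e]
  by_cases he : e ∈ diff <;> simp [he]

theorem A_loop (l : List Int) : ∀ (diff : List Int) (d : PySem.Dict Int Int) (idx : List Int),
    diff.Nodup → TblInv diff d →
    (l.foldl ipdStep (diff, d, idx)).1 = PySem.Set.update diff l ∧
    (l.foldl ipdStep (diff, d, idx)).2.2 =
      idx ++ l.map (fun e => (((PySem.Set.update diff l).idxOf e : Nat) : Int)) := by
  induction l with
  | nil => intro diff d idx _ _; simp [PySem.Set.update]
  | cons e rest ih =>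
    intro diff d idx hn hinv
    by_cases he : e ∈ diff
    · have hstep : ipdStep (diff, d, idx) e =
          (diff, d, idx ++ [((diff.idxOf e : Nat) : Int)]) := by
        simp only [ipdStep, tblInv_contains hinv, he, decide_true, Bool.not_true]
        simp [PySem.Dict.getD_eq_get?_getD, hinv e, he]
      have hupd : PySem.Set.update diff (e :: rest) = PySem.Set.update diff rest := by
        rw [PySem.Set.update_cons, PySem.Set.add_of_mem he]
      obtain ⟨h1, h2⟩ := ih diff d (idx ++ [((diff.idxOf e : Nat) : Int)]) hn hinv
      refine ⟨by simpa [hstep, hupd] using h1, ?_⟩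
      rw [List.foldl_cons, hstep, h2, hupd]
      have hidx : diff.idxOf e = (PySem.Set.update diff rest).idxOf e := by
        rw [PySem.Set.update_eq_append_filter, List.idxOf_append_of_mem he]
      simp [hidx]
    · have hstep : ipdStep (diff, d, idx) e =
          (diff ++ [e], d.insert e (diff.length : Int),
            idx ++ [((diff.length : Nat) : Int)]) := by
        simp only [ipdStep, tblInv_contains hinv, he, decide_false, Bool.not_false]
        simp [PySem.Dict.getD_insert_self]
      have hn' : (diff ++ [e]).Nodup := by
        rw [List.nodup_append]
        refine ⟨hn, List.nodup_singleton e, ?_⟩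
        intro a ha b hb
        rw [List.mem_singleton] at hb
        subst hb
        exact fun h => he (h ▸ ha)
      have hinv' := tblInv_extend hinv he
      have hupd : PySem.Set.update diff (e :: rest) = PySem.Set.update (diff ++ [e]) rest := by
        rw [PySem.Set.update_cons, PySem.Set.add_of_not_mem he]
      obtain ⟨h1, h2⟩ := ih (diff ++ [e]) (d.insert e (diff.length : Int))
        (idx ++ [((diff.length : Nat) : Int)]) hn' hinv'
      refine ⟨by simpa [hstep, hupd] using h1, ?_⟩
      rw [List.foldl_cons, hstep, h2, hupd]
      have hmem : e ∈ diff ++ [e] := by simp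
      have hidx : (PySem.Set.update (diff ++ [e]) rest).idxOf e = diff.length := by
        rw [PySem.Set.update_eq_append_filter, List.idxOf_append_of_mem hmem,
          List.idxOf_append_of_notMem he]
        simp
      simp [hidx]

-- A's result in closed form: the ordered dedup list, and each element's index in it
theorem A_closed (l : List Int) :
    index_per_different l =
      (PySem.List.dedup l, l.map (fun e => (((PySem.List.dedup l).idxOf e : Nat) : Int))) := by
  obtain ⟨h1, h2⟩ := A_loop l [] PySem.Dict.empty [] (by simp) tblInv_empty
  have hD : PySem.Set.update ([] : List Int) l = PySem.List.dedup l := by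
    rw [PySem.Set.update_nil_left, PySem.List.dedup_eq_ofList]
  unfold index_per_different
  refine Prod.ext ?_ ?_
  · simpa [hD] using h1
  · simpa [hD] using h2

-- B's `firsts`: the first-occurrence positions, = dedup l mapped to each element's l.index
theorem firsts_eq (l : List Int) :
    ((PySem.List.enumerate l 0).filter
        (fun p => (((PySem.List.index? l p.2).getD 0 : Nat) : Int) == p.1)).map (·.1) =
      (PySem.List.dedup l).map (fun e => (((PySem.List.index? l e).getD 0 : Nat) : Int)) := by
  induction l using List.reverseRecOn with
  | nil => simp [PySem.List.enumerate_nil]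
  | append_singleton l a ih =>
    have hfc : ∀ p ∈ PySem.List.enumerate l 0,
        ((((PySem.List.index? (l ++ [a]) p.2).getD 0 : Nat) : Int) == p.1) =
        ((((PySem.List.index? l p.2).getD 0 : Nat) : Int) == p.1) := by
      intro p hp
      obtain ⟨k, hk, hpe⟩ := (PySem.List.mem_enumerate_iff _ _ _).mp hp
      have hmem : p.2 ∈ l := by subst hpe; simp
      rw [PySem.List.index?_append_of_mem _ hmem]
    have hmc : ∀ e ∈ PySem.List.dedup l,
        (((PySem.List.index? (l ++ [a]) e).getD 0 : Nat) : Int) =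
        (((PySem.List.index? l e).getD 0 : Nat) : Int) := by
      intro e he
      rw [PySem.List.index?_append_of_mem _ ((PySem.List.mem_dedup l e).mp he)]
    have henum : PySem.List.enumerate (l ++ [a]) 0 =
        PySem.List.enumerate l 0 ++ [((l.length : Int), a)] := by
      rw [PySem.List.enumerate_append]
      simp [PySem.List.enumerate_cons, PySem.List.enumerate_nil]
    have hded : PySem.List.dedup (l ++ [a]) =
        if a ∈ l then PySem.List.dedup l else PySem.List.dedup l ++ [a] := by
      simp only [PySem.List.dedup_eq_ofList, PySem.Set.ofList_eq_foldl, List.foldl_append]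
      by_cases hal : a ∈ l
      · rw [List.foldl_cons, List.foldl_nil, PySem.Set.add_of_mem]
        · simp [hal]
        · rw [← PySem.Set.ofList_eq_foldl]
          exact (PySem.Set.mem_ofList l a).mpr hal
      · rw [List.foldl_cons, List.foldl_nil, PySem.Set.add_of_not_mem]
        · simp [hal]
        · rw [← PySem.Set.ofList_eq_foldl]
          exact fun h => hal ((PySem.Set.mem_ofList l a).mp h)
    have hmaps : (PySem.List.dedup l).map
        (fun e => (((PySem.List.index? (l ++ [a]) e).getD 0 : Nat) : Int)) =
        (PySem.List.dedup l).map (fun e => (((PySem.List.index? l e).getD 0 : Nat) : Int)) :=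
      List.map_congr_left hmc
    rw [henum, List.filter_append, List.filter_congr hfc, List.map_append, ih, hded]
    by_cases hal : a ∈ l
    · obtain ⟨k, hk⟩ := Option.isSome_iff_exists.mp ((PySem.List.index?_isSome_iff l a).mpr hal)
      have hklt : k < l.length := (PySem.List.getElem_of_index?_eq_some hk).fst
      have hidx : PySem.List.index? (l ++ [a]) a = some k := by
        rw [PySem.List.index?_append_of_mem _ hal, hk]
      simp only [hal, if_true, List.filter_cons, List.filter_nil, hidx, Option.getD_some]
      have hne : ((k : Nat) : Int) ≠ (l.length : Int) := by intro h; omega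
      simp only [beq_iff_eq, hne, if_false, List.map_nil, List.append_nil]
      exact hmaps.symm
    · have hidx : PySem.List.index? (l ++ [a]) a = some l.length :=
        PySem.List.index?_append_singleton_self l a hal
      simp only [hal, if_false, List.filter_cons, List.filter_nil, hidx, Option.getD_some,
        List.map_append, List.map_cons, List.map_nil, beq_self_eq_true, if_true]
      rw [hmaps]

-- l[first-occurrence position of e] = e, for e ∈ l
theorem get_first (l : List Int) (e : Int) (he : e ∈ l) :
    PySem.List.pyGetD l (((PySem.List.index? l e).getD 0 : Nat) : Int) 0 = e := by
  obtain ⟨k, hk⟩ := Option.isSome_iff_exists.mp ((PySem.List.index?_isSome_iff l e).mpr he)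
  obtain ⟨hlt, hget, _⟩ := PySem.List.getElem_of_index?_eq_some hk
  rw [hk]
  simp only [Option.getD_some]
  rw [PySem.List.pyGetD_natCast]
  simp [List.getD, hlt, hget]

-- looking a member's image up in a map by an injective-on-the-list function finds its position
theorem index?_map_inj {α β : Type} [DecidableEq α] [DecidableEq β]
    (D : List α) (g : α → β) (e : α) (he : e ∈ D)
    (hinj : ∀ x ∈ D, g x = g e → x = e) :
    PySem.List.index? (D.map g) (g e) = PySem.List.index? D e := by
  induction D with
  | nil => simp at he
  | cons x D' ih =>
    by_cases hx : g x = g e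
    · have : x = e := hinj x (by simp) hx
      subst this
      rw [List.map_cons, hx, PySem.List.index?_cons_self, PySem.List.index?_cons_self]
    · have hxe : x ≠ e := fun h => hx (h ▸ rfl)
      have he' : e ∈ D' := by rcases List.mem_cons.mp he with h | h; exact absurd h.symm hxe; exact h
      rw [List.map_cons, PySem.List.index?_cons_of_ne _ hx, PySem.List.index?_cons_of_ne _ hxe,
        ih he' (fun y hy => hinj y (List.mem_cons_of_mem _ hy))]

-- index? of a member, as idxOf
theorem index?_eq_some_idxOf (D : List Int) (e : Int) (he : e ∈ D) :
    PySem.List.index? D e = some (D.idxOf e) := by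
  rw [PySem.List.index?_eq_idxOf?]
  induction D with
  | nil => simp at he
  | cons x D' ih =>
    by_cases hx : x = e
    · subst hx; simp [List.idxOf?_cons]
    · have he' : e ∈ D' := by rcases List.mem_cons.mp he with h | h; exact absurd h.symm hx; exact h
      simp [List.idxOf?_cons, hx, ih he', beq_iff_eq]

-- ===== VERDICT (by name: the statement is the Claim_ definition above) =====
theorem index_per_different_spec : Claim_equal_index_per_different := by
  intro l _
  unfold Spec_index_per_different index_per_different_alt
  dsimp only
  rw [A_closed l, firsts_eq l]
  refine Prod.ext ?_ ?_ <;> dsimp only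
  · have h1 : ∀ e ∈ PySem.List.dedup l,
        ((fun i => PySem.List.pyGetD l i 0) ∘
          (fun e => (((PySem.List.index? l e).getD 0 : Nat) : Int))) e = id e := by
      intro e he
      exact get_first l e ((PySem.List.mem_dedup l e).mp he)
    rw [List.map_map] at *
    rw [List.map_congr_left h1, List.map_id]
  · apply List.map_congr_left
    intro e he
    have heD : e ∈ PySem.List.dedup l := (PySem.List.mem_dedup l e).mpr he
    have hinj : ∀ x ∈ PySem.List.dedup l,
        (((PySem.List.index? l x).getD 0 : Nat) : Int) =
        (((PySem.List.index? l e).getD 0 : Nat) : Int) → x = e := by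
      intro x hx hgx
      have hx' := get_first l x ((PySem.List.mem_dedup l x).mp hx)
      have he' := get_first l e he
      rw [← hx', ← he', hgx]
    rw [index?_map_inj (PySem.List.dedup l)
        (fun x => (((PySem.List.index? l x).getD 0 : Nat) : Int)) e heD hinj,
      index?_eq_some_idxOf _ _ heD]
    simp
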